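-- pv_equiv track=rewrite | github.com/LuizSSenko/ReportLabDMA | req_classes/pdf_tools.py | compute_sigla_first_occurrence
-- ===== SOURCE A (Python) =====
-- from typing import List
--
-- def compute_sigla_first_occurrence(entries: List[dict], table_pages: int) -> dict:
--     """
--     Calcula um dicionário que mapeia cada "sigla" para o número da página onde ela aparece
--     pela primeira vez nos registros (entries). Considera que as páginas de registros começam
--     após a capa e as páginas de tabelas. Cada página de entries contém 2 registros.
--
--     Parâmetros:
--       - entries: lista de dicionários com os dados de cada registro.
--       - table_pages: número total de páginas já utilizadas para tabelas.
--
--     Retorna: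
--       - Dicionário com cada sigla mapeada para o número da página onde ocorre a primeira vez.
--     """
--     offset = 1 + table_pages  # 1 para a capa + número de páginas de tabela
--     sigla_to_page = {}
--     for idx, entry in enumerate(entries):
--         sigla = entry.get('sigla')
--         page = offset + (idx // 2)
--         if sigla and sigla not in sigla_to_page:
--             sigla_to_page[sigla] = page
--     return sigla_to_page
-- ===== SOURCE B (Python) =====
-- def compute_sigla_first_occurrence(entries, table_pages):
--     """Reverse-pass re-implementation: walk the entries backwards overwriting
--     unconditionally, so each truthy sigla ends up mapped to its first (lowest)
--     index; then emit the mapping in first-occurrence order by sorting on that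
--     index. No membership test, no incremental 'seen' bookkeeping."""
--     first = {}
--     for idx in range(len(entries) - 1, -1, -1):
--         s = entries[idx].get('sigla')
--         if s:
--             first[s] = idx
--     offset = 1 + table_pages
--     return {s: offset + i // 2 for s, i in sorted(first.items(), key=lambda kv: kv[1])}
-- ===== Notes on version B (the rewrite author's own statement) =====
-- stated objective: alternative
-- what changed: B replaces A's forward loop with a 'seen' membership test by a reverse pass that overwrites unconditionally (so each truthy sigla ends up at its lowest index) followed by a sort on that first index to restore first-occurrence order.
import Mathlib
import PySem

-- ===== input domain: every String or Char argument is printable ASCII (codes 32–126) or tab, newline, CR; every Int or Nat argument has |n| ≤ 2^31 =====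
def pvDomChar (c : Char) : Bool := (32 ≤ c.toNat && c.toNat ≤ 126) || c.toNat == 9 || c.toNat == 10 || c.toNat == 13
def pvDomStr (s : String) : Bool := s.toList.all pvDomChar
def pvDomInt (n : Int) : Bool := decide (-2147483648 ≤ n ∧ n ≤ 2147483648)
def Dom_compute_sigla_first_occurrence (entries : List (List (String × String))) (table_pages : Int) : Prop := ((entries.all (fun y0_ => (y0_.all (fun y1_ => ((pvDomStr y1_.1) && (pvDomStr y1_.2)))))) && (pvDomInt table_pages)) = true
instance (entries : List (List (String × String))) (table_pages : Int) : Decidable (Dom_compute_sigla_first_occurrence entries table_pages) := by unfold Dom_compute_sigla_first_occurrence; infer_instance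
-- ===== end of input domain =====

-- B drops A's incremental 'seen' membership test: a reverse pass overwrites unconditionally so
-- each truthy sigla keeps its lowest index, and a final sort on that index restores A's order.

-- ===== PORT A =====
def compute_sigla_first_occurrence (entries : List (List (String × String))) (table_pages : Int) : List (String × Int) :=
  let offset := 1 + table_pages
  ((PySem.List.enumerate entries 0).foldl
    (fun d p =>
      let sigla := (PySem.Dict.mk p.2).get? "sigla"
      let page := offset + PySem.Int.floordiv p.1 2
      match sigla with
      | some s => if s ≠ "" ∧ d.get? s = none then d.insert s page else d
      | none => d)
    PySem.Dict.empty).items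

-- ===== PORT B =====
def compute_sigla_first_occurrence_alt (entries : List (List (String × String))) (table_pages : Int) : List (String × Int) :=
  -- reverse pass: for idx in range(len(entries)-1, -1, -1): first[s] = idx (unconditional overwrite)
  let first := (PySem.List.pyRange ((entries.length : Int) - 1) (-1) (-1)).foldl
    (fun d idx =>
      match (PySem.Dict.mk (PySem.List.pyGetD entries idx [])).get? "sigla" with
      | some s => if s ≠ "" then d.insert s idx else d
      | none => d)
    PySem.Dict.empty
  let offset := 1 + table_pages
  -- {s: offset + i // 2 for s, i in sorted(first.items(), key=lambda kv: kv[1])}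
  ((PySem.List.sorted first.items (fun kv => kv.2) false).foldl
      (fun d kv => d.insert kv.1 (offset + PySem.Int.floordiv kv.2 2))
      PySem.Dict.empty).items

-- ===== PRECONDITION & SPEC =====
def Spec_compute_sigla_first_occurrence (entries : List (List (String × String))) (table_pages : Int) (out : List (String × Int)) : Prop := out = compute_sigla_first_occurrence_alt entries table_pages
instance (entries : List (List (String × String))) (table_pages : Int) (out : List (String × Int)) : Decidable (Spec_compute_sigla_first_occurrence entries table_pages out) := by unfold Spec_compute_sigla_first_occurrence; infer_instance

-- ===== CLAIM (what is proved, stated in full; the proofs are below) =====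
def Claim_equal_compute_sigla_first_occurrence : Prop := ∀ (entries : List (List (String × String))) (table_pages : Int), Dom_compute_sigla_first_occurrence entries table_pages → Spec_compute_sigla_first_occurrence entries table_pages (compute_sigla_first_occurrence entries table_pages)

-- ===== LEMMAS AND PROOFS =====

-- A's loop body on the sigla column
def pvAStep (off : Int) (d : PySem.Dict String Int) (p : Int × Option String) : PySem.Dict String Int :=
  match p.2 with
  | some s => if s ≠ "" ∧ d.get? s = none then d.insert s (off + PySem.Int.floordiv p.1 2) else d
  | none => d

-- B's reverse-loop body on the sigla column
def pvBStep (d : PySem.Dict String Int) (p : Int × Option String) : PySem.Dict String Int :=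
  match p.2 with
  | some s => if s ≠ "" then d.insert s p.1 else d
  | none => d

-- insert-if-absent (A's conditional insert, value-independent control)
def pvMergeStep (d : PySem.Dict String Int) (q : String × Int) : PySem.Dict String Int :=
  if d.get? q.1 = none then d.insert q.1 q.2 else d

-- the common specification list: (sigla, first index) in first-occurrence order
def pvF : List (Int × Option String) → List (String × Int)
  | [] => []
  | (i, o) :: t =>
    match o with
    | some s => if s = "" then pvF t else (s, i) :: (pvF t).filter (fun q => q.1 != s)
    | none => pvF t

def pvPg (off : Int) (q : String × Int) : String × Int := (q.1, off + PySem.Int.floordiv q.2 2)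

def pvR (col : List (Int × Option String)) : PySem.Dict String Int :=
  col.foldr (fun p d => pvBStep d p) PySem.Dict.empty

lemma pvEnumerateMap {α β : Type} (f : α → β) (l : List α) (s : Int) :
    PySem.List.enumerate (l.map f) s = (PySem.List.enumerate l s).map (fun p => (p.1, f p.2)) := by
  induction l generalizing s with
  | nil => simp [PySem.List.enumerate_nil]
  | cons x xs ih => simp [PySem.List.enumerate_cons, ih]

lemma pvMergeKeys (d : PySem.Dict String Int) (q : String × Int) (s : String) (h : s ∈ d.keys) :
    s ∈ (pvMergeStep d q).keys := by
  unfold pvMergeStep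
  split_ifs with h1
  · exact (PySem.Dict.mem_keys_insert _ _ _ _).mpr (Or.inr h)
  · exact h

lemma pvMergeSkip (s : String) : ∀ (l : List (String × Int)) (d : PySem.Dict String Int),
    s ∈ d.keys →
    l.foldl pvMergeStep d = (l.filter (fun q => q.1 != s)).foldl pvMergeStep d := by
  intro l
  induction l with
  | nil => intro d _; rfl
  | cons q t ih =>
    intro d hd
    by_cases hq : q.1 = s
    · have hstep : pvMergeStep d q = d := by
        unfold pvMergeStep
        rw [if_neg]
        intro hnone
        exact ((PySem.Dict.get?_eq_none_iff_not_mem_keys d q.1).mp hnone) (hq ▸ hd)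
      simp only [List.foldl_cons, List.filter_cons, hq, bne_self_eq_false, hstep]
      exact ih d hd
    · simp only [List.foldl_cons, List.filter_cons, show (q.1 != s) = true by simpa using hq]
      exact ih (pvMergeStep d q) (pvMergeKeys d q s hd)

lemma pvFilterMap (off : Int) (s : String) (l : List (String × Int)) :
    (l.filter (fun q => q.1 != s)).map (pvPg off) = (l.map (pvPg off)).filter (fun q => q.1 != s) := by
  induction l with
  | nil => rfl
  | cons q t ih =>
    simp only [List.filter_cons, List.map_cons]
    by_cases hq : (q.1 != s) = true
    · simp [hq, pvPg, ih]
    · simp only [Bool.not_eq_true] at hq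
      simp [hq, pvPg, ih]

lemma pvAChar (off : Int) : ∀ (col : List (Int × Option String)) (d : PySem.Dict String Int),
    col.foldl (pvAStep off) d = ((pvF col).map (pvPg off)).foldl pvMergeStep d := by
  intro col
  induction col with
  | nil => intro d; rfl
  | cons p t ih =>
    intro d
    obtain ⟨i, o⟩ := p
    cases o with
    | none => simpa [pvAStep, pvF] using ih d
    | some s =>
      by_cases hs : s = ""
      · subst hs
        simpa [pvAStep, pvF] using ih d
      · have hstep : pvAStep off d (i, some s) = pvMergeStep d (pvPg off (s, i)) := by
          simp [pvAStep, pvMergeStep, pvPg, hs]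
        have hmem : s ∈ (pvMergeStep d (pvPg off (s, i))).keys := by
          unfold pvMergeStep pvPg
          split_ifs with h1
          · exact (PySem.Dict.mem_keys_insert _ _ _ _).mpr (Or.inl rfl)
          · by_contra hn
            exact h1 (by simpa [pvPg] using (PySem.Dict.get?_eq_none_iff_not_mem_keys d s).mpr hn)
        simp only [List.foldl_cons, pvF, if_neg hs, List.map_cons, hstep, pvFilterMap]
        rw [ih (pvMergeStep d (pvPg off (s, i))),
          pvMergeSkip s ((pvF t).map (pvPg off)) _ hmem]

lemma pvFMemCol : ∀ (col : List (Int × Option String)) (q : String × Int),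
    q ∈ pvF col → (q.2, some q.1) ∈ col := by
  intro col
  induction col with
  | nil => intro q h; simp [pvF] at h
  | cons p t ih =>
    intro q h
    obtain ⟨i, o⟩ := p
    cases o with
    | none => exact List.mem_cons_of_mem _ (ih q h)
    | some s =>
      by_cases hs : s = ""
      · subst hs; exact List.mem_cons_of_mem _ (ih q (by simpa [pvF] using h))
      · simp only [pvF, if_neg hs, List.mem_cons] at h
        rcases h with h | h
        · subst h; exact List.mem_cons_self
        · exact List.mem_cons_of_mem _ (ih q (List.mem_of_mem_filter h))

lemma pvFNodup : ∀ (col : List (Int × Option String)), ((pvF col).map Prod.fst).Nodup := by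
  intro col
  induction col with
  | nil => simp [pvF]
  | cons p t ih =>
    obtain ⟨i, o⟩ := p
    cases o with
    | none => simpa [pvF] using ih
    | some s =>
      by_cases hs : s = ""
      · simpa [pvF, hs] using ih
      · simp only [pvF, if_neg hs, List.map_cons, List.nodup_cons]
        constructor
        · intro hmem
          obtain ⟨q, hq, hq1⟩ := List.mem_map.mp hmem
          have := List.of_mem_filter hq
          simp [hq1] at this
        · exact List.Nodup.sublist
            (List.Sublist.map Prod.fst List.filter_sublist) ih

lemma pvFPairwise : ∀ (col : List (Int × Option String)),
    col.Pairwise (fun p q => p.1 < q.1) → (pvF col).Pairwise (fun a b => a.2 < b.2) := by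
  intro col
  induction col with
  | nil => intro _; simp [pvF]
  | cons p t ih =>
    intro hp
    obtain ⟨hhead, htail⟩ := List.pairwise_cons.mp hp
    obtain ⟨i, o⟩ := p
    cases o with
    | none => exact ih htail
    | some s =>
      by_cases hs : s = ""
      · simpa [pvF, hs] using ih htail
      · simp only [pvF, if_neg hs, List.pairwise_cons]
        refine ⟨?_, List.Pairwise.sublist List.filter_sublist (ih htail)⟩
        intro b hb
        have hbt : (b.2, some b.1) ∈ t := pvFMemCol t b (List.mem_of_mem_filter hb)
        simpa using hhead _ hbt

lemma pvRNodupKeys : ∀ (col : List (Int × Option String)), (pvR col).keys.Nodup := by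
  intro col
  induction col with
  | nil => exact PySem.Dict.nodup_keys_empty
  | cons p t ih =>
    show ((fun p d => pvBStep d p) p (pvR t)).keys.Nodup
    unfold pvBStep
    obtain ⟨i, o⟩ := p
    cases o with
    | none => exact ih
    | some s =>
      by_cases hs : s = ""
      · simpa [hs] using ih
      · simpa [hs] using PySem.Dict.nodup_keys_insert (pvR t) s i ih

lemma pvRGet : ∀ (col : List (Int × Option String)) (s : String) (i : Int),
    (pvR col).get? s = some i ↔ (s, i) ∈ pvF col := by
  intro col
  induction col with
  | nil => intro s i; simp [pvR, pvF, PySem.Dict.get?_empty]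
  | cons p t ih =>
    intro s i
    obtain ⟨j, o⟩ := p
    have hstep : pvR ((j, o) :: t) = pvBStep (pvR t) (j, o) := rfl
    cases o with
    | none => rw [hstep]; exact ih s i
    | some s0 =>
      by_cases hs0 : s0 = ""
      · rw [hstep]; simp only [pvBStep, hs0]; simpa [pvF] using ih s i
      · rw [hstep]
        simp only [pvBStep, hs0, if_true, ne_eq, not_false_iff]
        by_cases hss : s = s0
        · subst hss
          rw [PySem.Dict.get?_insert_self]
          simp only [pvF, if_neg hs0, List.mem_cons]
          constructor
          · intro h; exact Or.inl (by simpa using h.symm)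
          · rintro (h | h)
            · simp at h; simp [h]
            · have := List.of_mem_filter h; simp at this
        · rw [PySem.Dict.get?_insert_of_ne _ _ hss]
          simp only [pvF, if_neg hs0, List.mem_cons]
          rw [ih s i]
          constructor
          · intro h
            exact Or.inr (List.mem_filter.mpr ⟨h, by simpa using hss⟩)
          · rintro (h | h)
            · exact absurd (by simpa using congrArg Prod.fst h) hss
            · exact List.mem_of_mem_filter h

lemma pvRPerm (col : List (Int × Option String)) :
    (pvF col).Perm (pvR col).items := by
  have hndR : (pvR col).items.Nodup :=
    List.Nodup.of_map Prod.fst (by simpa [PySem.Dict.keys] using pvRNodupKeys col)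
  have hndF : (pvF col).Nodup := List.Nodup.of_map Prod.fst (pvFNodup col)
  refine (List.perm_ext_iff_of_nodup hndF hndR).mpr ?_
  intro q
  constructor
  · intro h
    have := PySem.Dict.mem_items_of_get?_eq_some (d := pvR col)
      ((pvRGet col q.1 q.2).mpr (by simpa using h))
    simpa using this
  · intro h
    exact (pvRGet col q.1 q.2).mp
      (PySem.Dict.get?_of_mem_items _ (by simpa using h) (pvRNodupKeys col))

lemma pvMergeFresh : ∀ (l : List (String × Int)) (d : PySem.Dict String Int),
    (∀ q ∈ l, d.get? q.1 = none) → (l.map Prod.fst).Nodup →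
    l.foldl pvMergeStep d = l.foldl (fun d q => d.insert q.1 q.2) d := by
  intro l
  induction l with
  | nil => intro d _ _; rfl
  | cons q t ih =>
    intro d hf hnd
    have hstep : pvMergeStep d q = d.insert q.1 q.2 := by
      unfold pvMergeStep
      rw [if_pos (hf q List.mem_cons_self)]
    simp only [List.map_cons, List.nodup_cons] at hnd
    simp only [List.foldl_cons, hstep]
    refine ih (d.insert q.1 q.2) ?_ hnd.2
    intro r hr
    have hne : r.1 ≠ q.1 := by
      intro he
      exact hnd.1 (he ▸ List.mem_map.mpr ⟨r, hr, rfl⟩)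
    rw [PySem.Dict.get?_insert_of_ne _ _ hne]
    exact hf r (List.mem_cons_of_mem _ hr)

lemma pvInsertFoldItems (v : String × Int → Int) :
    ∀ (l : List (String × Int)), (l.map Prod.fst).Nodup →
    (l.foldl (fun d q => d.insert q.1 (v q)) PySem.Dict.empty).items = l.map (fun q => (q.1, v q)) := by
  intro l hnd
  have := PySem.Dict.items_foldl_insert_fresh (l := l) (k := Prod.fst) (v := v)
    (d := PySem.Dict.empty) (by intro a _; exact PySem.Dict.contains_empty _) hnd
  simpa using this

-- ===== VERDICT (by name: the statement is the Claim_ definition above) =====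
lemma pvPgFst (off : Int) (l : List (String × Int)) :
    (l.map (pvPg off)).map Prod.fst = l.map Prod.fst := by
  simp [pvPg, Function.comp]

theorem compute_sigla_first_occurrence_spec : Claim_equal_compute_sigla_first_occurrence := by
  intro entries table_pages _
  unfold Spec_compute_sigla_first_occurrence
  unfold compute_sigla_first_occurrence compute_sigla_first_occurrence_alt
  simp only []
  have hcolpw : (PySem.List.enumerate (entries.map (fun e => (PySem.Dict.mk e).get? "sigla")) 0).Pairwise
      (fun p q => p.1 < q.1) := PySem.List.pairwise_lt_enumerate _ _
  -- A side
  have hA : ((PySem.List.enumerate entries 0).foldl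
      (fun d p =>
        let sigla := (PySem.Dict.mk p.2).get? "sigla"
        let page := 1 + table_pages + PySem.Int.floordiv p.1 2
        match sigla with
        | some s => if s ≠ "" ∧ d.get? s = none then d.insert s page else d
        | none => d)
      PySem.Dict.empty).items
      = ((pvF (PySem.List.enumerate (entries.map (fun e => (PySem.Dict.mk e).get? "sigla")) 0)).map
          (pvPg (1 + table_pages))) := by
    rw [show (PySem.List.enumerate entries 0).foldl
        (fun d p =>
          let sigla := (PySem.Dict.mk p.2).get? "sigla"
          let page := 1 + table_pages + PySem.Int.floordiv p.1 2
          match sigla with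
          | some s => if s ≠ "" ∧ d.get? s = none then d.insert s page else d
          | none => d)
        PySem.Dict.empty
        = (PySem.List.enumerate (entries.map (fun e => (PySem.Dict.mk e).get? "sigla")) 0).foldl
            (pvAStep (1 + table_pages)) PySem.Dict.empty from by
      rw [pvEnumerateMap, List.foldl_map]; rfl]
    rw [pvAChar]
    rw [pvMergeFresh _ _ (by intro q _; exact PySem.Dict.get?_empty _)
      (by rw [pvPgFst]; exact pvFNodup _)]
    have := pvInsertFoldItems Prod.snd
      ((pvF (PySem.List.enumerate (entries.map (fun e => (PySem.Dict.mk e).get? "sigla")) 0)).map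
        (pvPg (1 + table_pages)))
      (by rw [pvPgFst]; exact pvFNodup _)
    simpa using this
  rw [hA]
  -- B side
  have hfirst : (PySem.List.pyRange ((entries.length : Int) - 1) (-1) (-1)).foldl
      (fun d idx =>
        match (PySem.Dict.mk (PySem.List.pyGetD entries idx [])).get? "sigla" with
        | some s => if s ≠ "" then d.insert s idx else d
        | none => d)
      PySem.Dict.empty
      = pvR (PySem.List.enumerate (entries.map (fun e => (PySem.Dict.mk e).get? "sigla")) 0) := by
    rw [show PySem.List.pyRange ((entries.length : Int) - 1) (-1) (-1)
        = (PySem.List.pyRange 0 (PySem.List.len entries) 1).reverse from by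
      rw [PySem.List.pyRange_neg_one_eq_reverse]
      norm_num [PySem.List.len]]
    rw [List.foldl_reverse]
    unfold pvR
    rw [pvEnumerateMap, PySem.List.enumerate_eq_map_pyRange entries [], List.foldr_map,
      List.foldr_map]
    rfl
  rw [hfirst]
  have hsorted : PySem.List.sorted
      (pvR (PySem.List.enumerate (entries.map (fun e => (PySem.Dict.mk e).get? "sigla")) 0)).items
      (fun kv => kv.2) false
      = pvF (PySem.List.enumerate (entries.map (fun e => (PySem.Dict.mk e).get? "sigla")) 0) :=
    PySem.List.sorted_eq_of_perm_of_pairwise_lt _ _ _ (pvRPerm _) (pvFPairwise _ hcolpw)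
  rw [hsorted]
  have := pvInsertFoldItems (fun q => 1 + table_pages + PySem.Int.floordiv q.2 2)
    (pvF (PySem.List.enumerate (entries.map (fun e => (PySem.Dict.mk e).get? "sigla")) 0))
    (pvFNodup _)
  rw [this]
  rfl
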